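-- pv_equiv track=rewrite | github.com/caoandong/continual-learning | src/continual_learning/state.py | split_channel_tokens
-- ===== SOURCE A (Python) =====
-- def split_channel_tokens(
--     tokens: tuple[str, ...],
-- ) -> tuple[tuple[str, ...], tuple[str, ...], tuple[str, ...]]:
--     primary = tuple(
--         token
--         for token in tokens
--         if not token.startswith("sensory:") and not token.startswith("feedback:")
--     )
--     sensory = tuple(token for token in tokens if token.startswith("sensory:"))
--     feedback = tuple(token for token in tokens if token.startswith("feedback:"))
--     return primary, sensory, feedback
-- ===== SOURCE B (Python) =====
-- def split_channel_tokens(tokens):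
--     primary, sensory, feedback = [], [], []
--     for token in tokens:
--         if token.startswith("sensory:"):
--             sensory.append(token)
--         elif token.startswith("feedback:"):
--             feedback.append(token)
--         else:
--             primary.append(token)
--     return tuple(primary), tuple(sensory), tuple(feedback)
-- ===== Notes on version B (the rewrite author's own statement) =====
-- stated objective: simpler
-- what changed: Replaces three independent filtering passes over tokens with one classifying loop that appends each token to the matching of three accumulator lists.
import Mathlib
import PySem

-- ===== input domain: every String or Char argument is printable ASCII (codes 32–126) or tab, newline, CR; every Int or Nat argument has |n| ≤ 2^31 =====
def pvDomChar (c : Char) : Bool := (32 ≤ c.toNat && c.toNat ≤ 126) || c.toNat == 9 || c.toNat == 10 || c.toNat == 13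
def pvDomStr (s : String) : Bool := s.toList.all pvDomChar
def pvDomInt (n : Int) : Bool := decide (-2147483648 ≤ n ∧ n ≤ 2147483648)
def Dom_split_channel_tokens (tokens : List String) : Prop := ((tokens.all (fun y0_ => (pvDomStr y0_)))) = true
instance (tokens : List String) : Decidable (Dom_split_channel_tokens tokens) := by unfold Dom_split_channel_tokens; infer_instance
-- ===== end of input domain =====

-- B replaces A's three filtering passes with one classifying loop over three accumulators (objective: simpler).

-- ===== PORT A =====
-- three generator-expression filters, transliterated as three List.filter passes
def split_channel_tokens (tokens : List String) : List String × List String × List String :=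
  let primary := tokens.filter (fun t => !(PySem.Str.startswith t "sensory:") && !(PySem.Str.startswith t "feedback:"))
  let sensory := tokens.filter (fun t => PySem.Str.startswith t "sensory:")
  let feedback := tokens.filter (fun t => PySem.Str.startswith t "feedback:")
  (primary, sensory, feedback)

-- ===== PORT B =====
-- one for-loop over tokens, state = the three lists being appended to
def split_channel_tokens_alt (tokens : List String) : List String × List String × List String :=
  tokens.foldl
    (fun acc t =>
      if PySem.Str.startswith t "sensory:" then (acc.1, acc.2.1 ++ [t], acc.2.2)
      else if PySem.Str.startswith t "feedback:" then (acc.1, acc.2.1, acc.2.2 ++ [t])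
      else (acc.1 ++ [t], acc.2.1, acc.2.2))
    ([], [], [])

-- ===== PRECONDITION & SPEC =====
def Spec_split_channel_tokens (tokens : List String) (out : List String × List String × List String) : Prop := out = split_channel_tokens_alt tokens
instance (tokens : List String) (out : List String × List String × List String) : Decidable (Spec_split_channel_tokens tokens out) := by unfold Spec_split_channel_tokens; infer_instance

-- ===== CLAIM (what is proved, stated in full; the proofs are below) =====
def Claim_equal_split_channel_tokens : Prop := ∀ (tokens : List String), Dom_split_channel_tokens tokens → Spec_split_channel_tokens tokens (split_channel_tokens tokens)

-- ===== LEMMAS AND PROOFS =====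

theorem sens_not_feed (l : List Char) (h : PySem.Chars.startswith l ['s','e','n','s','o','r','y',':'] = true) :
    PySem.Chars.startswith l ['f','e','e','d','b','a','c','k',':'] = false := by
  rw [PySem.Chars.startswith_iff] at h
  obtain ⟨u, hu⟩ := h
  refine Bool.eq_false_iff.mpr ?_
  intro hf
  rw [PySem.Chars.startswith_iff] at hf
  obtain ⟨v, hv⟩ := hf
  rw [← hu] at hv
  simp at hv

theorem split_fold_inv (ts : List String) (p s f : List String) :
    ts.foldl
      (fun acc t =>
        if PySem.Str.startswith t "sensory:" then (acc.1, acc.2.1 ++ [t], acc.2.2)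
        else if PySem.Str.startswith t "feedback:" then (acc.1, acc.2.1, acc.2.2 ++ [t])
        else (acc.1 ++ [t], acc.2.1, acc.2.2))
      (p, s, f)
    = (p ++ ts.filter (fun t => !(PySem.Str.startswith t "sensory:") && !(PySem.Str.startswith t "feedback:")),
       s ++ ts.filter (fun t => PySem.Str.startswith t "sensory:"),
       f ++ ts.filter (fun t => PySem.Str.startswith t "feedback:")) := by
  induction ts generalizing p s f with
  | nil => simp
  | cons t ts ih =>
    simp only [List.foldl_cons, List.filter_cons]
    simp at ih
    by_cases hs : PySem.Str.startswith t "sensory:" = true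
    · simp at hs; simp [hs, sens_not_feed _ hs, ih]
    · by_cases hf : PySem.Str.startswith t "feedback:" = true
      · simp at hs hf; simp [hs, hf, ih]
      · simp at hs hf; simp [hs, hf, ih]


-- ===== VERDICT (by name: the statement is the Claim_ definition above) =====
theorem split_channel_tokens_spec : Claim_equal_split_channel_tokens := by
  intro tokens _
  unfold Spec_split_channel_tokens split_channel_tokens split_channel_tokens_alt
  rw [split_fold_inv]
  simp
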